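-- pv_equiv track=rewrite | github.com/DoubleJONY/KDJ-algorithm-challenge | minsoo/heap/disk_controller.py | solution
-- ===== SOURCE A (Python) =====
-- import heapq
--
-- def solution(jobs):
--     min_heap = []
--     heapq.heapify(min_heap)
--
--     jobs.sort()
--     _len, i = len(jobs), 0
--     t, t_sum = 0, 0
--     while i < _len or min_heap:
--         while i < _len and t >= jobs[i][0]:
--             heapq.heappush(min_heap, jobs[i][::-1])
--             i += 1
--         if min_heap:
--             t_takes, t_start = heapq.heappop(min_heap)
--             t += t_takes
--             t_sum += t - t_start
--         else:
--             t = jobs[i][0]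
--
--     return t_sum // _len
-- ===== SOURCE B (Python) =====
-- def solution(jobs):
--     jobs.sort()  # same in-place sort/mutation as A
--     n = len(jobs)
--     waiting = [(s, d) for s, d in jobs]  # queue of not-yet-released jobs, ascending start
--     ready = []                           # released, unscheduled jobs
--     t, t_sum = 0, 0
--     while waiting or ready:
--         while waiting and waiting[0][0] <= t:
--             ready.append(waiting.pop(0))
--         if ready:
--             s, d = min(ready, key=lambda j: (j[1], j[0]))
--             ready.remove((s, d))
--             t += d
--             t_sum += t - s
--         else:
--             t = waiting[0][0]
--     return t_sum // n
-- ===== Notes on version B (the rewrite author's own statement) =====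
-- stated objective: simpler
-- what changed: Replaces the heapq binary heap and index-based release scan with two plain lists (a waiting queue popped from the front and an unsorted ready pool from which the (duration,start)-minimum is picked by a linear scan), removing the heap module entirely.
-- outside the precondition, e.g. on solution([]): A raises ZeroDivisionError, B raises ZeroDivisionError; on solution([[1]]): A raises ValueError, B raises ValueError
import Mathlib
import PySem

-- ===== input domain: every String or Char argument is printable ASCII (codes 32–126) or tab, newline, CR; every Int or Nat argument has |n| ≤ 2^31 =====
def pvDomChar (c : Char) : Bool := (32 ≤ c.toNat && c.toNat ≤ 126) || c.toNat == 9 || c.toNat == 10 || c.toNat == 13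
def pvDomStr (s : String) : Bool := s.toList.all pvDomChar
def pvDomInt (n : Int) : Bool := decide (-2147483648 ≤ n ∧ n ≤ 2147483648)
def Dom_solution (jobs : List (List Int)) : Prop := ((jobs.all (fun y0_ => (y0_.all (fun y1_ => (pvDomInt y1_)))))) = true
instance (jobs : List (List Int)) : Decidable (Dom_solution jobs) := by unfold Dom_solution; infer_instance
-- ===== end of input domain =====

-- B replaces A's heapq priority queue by two plain lists (waiting queue + unsorted ready
-- pool scanned linearly for its (duration,start)-minimum); both Pythons mutate `jobs` by
-- the same in-place sort, and the equivalence proved here is about the return value.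
-- Both loop ports carry a fuel argument (2*n+2, an exact upper bound on the Python
-- while-loop's iterations: at most n pops and n clock jumps) purely as a totality guard.

-- ===== PORT A =====
-- Under Pre_ every job is a 2-list [start, duration]; `jobPair` is the exact reading of
-- such a job as a pair, so jobs.sort() (lexicographic on 2-lists) is sorted2 on the pairs.
def jobPair (j : List Int) : Int × Int := (j.getD 0 0, j.getD 1 0)

-- lexicographic ≤ on pairs = Python's list comparison of the heap items [dur, start]
def pleB (a b : Int × Int) : Bool := a.1 < b.1 || (a.1 == b.1 && a.2 ≤ b.2)

-- heapq.heappush ported as an exact priority queue kept as a sorted list: insertion at the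
-- ordered position (heapq's contract: the pool with x added, smallest first retrievable).
def hpush (x : Int × Int) : List (Int × Int) → List (Int × Int)
  | [] => [x]
  | y :: ys => if pleB x y then x :: y :: ys else y :: hpush x ys

-- inner `while i < _len and t >= jobs[i][0]`: push jobs[i][::-1] (the reversed 2-list,
-- i.e. the swapped pair) and advance i; gas = n - i bounds the remaining iterations exactly
def drain (js : List (Int × Int)) (n : Nat) : Nat → Nat → List (Int × Int) → Int →
    Nat × List (Int × Int)
  | 0, i, heap, _ => (i, heap)
  | gas + 1, i, heap, t =>
      if i < n ∧ (js.getD i (0, 0)).1 ≤ t then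
        drain js n gas (i + 1) (hpush ((js.getD i (0, 0)).2, (js.getD i (0, 0)).1) heap) t
      else (i, heap)

-- outer `while i < _len or min_heap`; heapq.heappop ported as the priority queue's
-- take-smallest (head of the sorted pool)
def loopA (js : List (Int × Int)) (n : Nat) : Nat → Nat → List (Int × Int) → Int → Int → Int
  | 0, _, _, _, tsum => tsum
  | fuel + 1, i, heap, t, tsum =>
      match drain js n (n - i) i heap t with
      | (i', m :: rest) => loopA js n fuel i' rest (t + m.1) (tsum + (t + m.1 - m.2))
      | (i', []) =>
          if i' < n then loopA js n fuel i' [] ((js.getD i' (0, 0)).1) tsum else tsum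

def solution (jobs : List (List Int)) : Int :=
  let js := PySem.List.sorted2 (jobs.map jobPair) (fun p => p.1) (fun p => p.2)
  PySem.Int.floordiv (loopA js js.length (2 * js.length + 2) 0 [] 0 0) (jobs.length : Int)

-- ===== PORT B =====
-- `while waiting and waiting[0][0] <= t: ready.append(waiting.pop(0))`
def release (waiting ready : List (Int × Int)) (t : Int) :
    List (Int × Int) × List (Int × Int) :=
  match waiting with
  | [] => ([], ready)
  | x :: w => if x.1 ≤ t then release w (ready ++ [x]) t else (x :: w, ready)

-- min(ready, key=lambda j: (j[1], j[0])): linear scan, first extremal element wins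
def pickMin (b : Int × Int) (rs : List (Int × Int)) : Int × Int :=
  rs.foldl (fun b y => if y.2 < b.2 ∨ (y.2 = b.2 ∧ y.1 < b.1) then y else b) b

-- `while waiting or ready`; .remove of the picked job is erase of its first occurrence;
-- the same fuel bound guards totality
def loopB : Nat → List (Int × Int) → List (Int × Int) → Int → Int → Int
  | 0, _, _, _, tsum => tsum
  | fuel + 1, waiting, ready, t, tsum =>
      match release waiting ready t with
      | (w', m0 :: rest) =>
          let m := pickMin m0 rest
          loopB fuel w' ((m0 :: rest).erase m) (t + m.2) (tsum + (t + m.2 - m.1))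
      | ([], []) => tsum
      | (x :: w, []) => loopB fuel (x :: w) [] x.1 tsum

def solution_alt (jobs : List (List Int)) : Int :=
  let js := PySem.List.sorted2 (jobs.map (fun j => (j.getD 0 0, j.getD 1 0)))
      (fun p => p.1) (fun p => p.2)
  PySem.Int.floordiv (loopB (2 * js.length + 2) js [] 0 0) (jobs.length : Int)

-- ===== PRECONDITION & SPEC =====
-- Pre_ excludes exactly the inputs where A raises: jobs = [] (ZeroDivisionError in
-- t_sum // _len) and any job that is not a 2-list (IndexError on jobs[i][0] for an empty
-- job, ValueError unpacking the popped item otherwise).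
def Pre_solution (jobs : List (List Int)) : Prop :=
  jobs ≠ [] ∧ ∀ j ∈ jobs, j.length = 2
instance (jobs : List (List Int)) : Decidable (Pre_solution jobs) := by
  unfold Pre_solution; infer_instance

def pvWitness_solution : List (List Int) := [[0, 3], [1, 9], [2, 6]]

def Spec_solution (jobs : List (List Int)) (out : Int) : Prop := out = solution_alt jobs
instance (jobs : List (List Int)) (out : Int) : Decidable (Spec_solution jobs out) := by
  unfold Spec_solution; infer_instance

-- ===== CLAIM (what is proved, stated in full; the proofs are below) =====
def Claim_equal_solution : Prop :=
  ∀ (jobs : List (List Int)), Dom_solution jobs → Pre_solution jobs →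
    Spec_solution jobs (solution jobs)

-- ===== LEMMAS AND PROOFS =====

-- the order pleB as a Prop, and its order facts (Python compares the heap items [dur, start]
-- lexicographically)
def PLE (a b : Int × Int) : Prop := pleB a b = true

theorem pleB_iff (a b : Int × Int) :
    pleB a b = true ↔ (a.1 < b.1 ∨ (a.1 = b.1 ∧ a.2 ≤ b.2)) := by
  simp [pleB]

theorem PLE_refl (a : Int × Int) : PLE a a := by simp [PLE, pleB_iff]

theorem PLE_trans {a b c : Int × Int} (h1 : PLE a b) (h2 : PLE b c) : PLE a c := by
  simp only [PLE, pleB_iff] at *; omega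

theorem PLE_total {a b : Int × Int} (h : ¬ PLE a b) : PLE b a := by
  simp only [PLE, pleB_iff] at *; omega

theorem PLE_antisymm {a b : Int × Int} (h1 : PLE a b) (h2 : PLE b a) : a = b := by
  simp only [PLE, pleB_iff] at *
  have : a.1 = b.1 ∧ a.2 = b.2 := by omega
  exact Prod.ext this.1 this.2

theorem hpush_perm (x : Int × Int) (l : List (Int × Int)) : (hpush x l).Perm (x :: l) := by
  induction l with
  | nil => exact List.Perm.refl _
  | cons y ys ih =>
      simp only [hpush]
      split
      · exact List.Perm.refl _
      · exact (ih.cons y).trans (List.Perm.swap x y ys)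

theorem hpush_sorted (x : Int × Int) {l : List (Int × Int)} (hp : l.Pairwise PLE) :
    (hpush x l).Pairwise PLE := by
  induction l with
  | nil => simp [hpush]
  | cons y ys ih =>
      rw [List.pairwise_cons] at hp
      simp only [hpush]
      split
      · rename_i hxy
        rw [List.pairwise_cons]
        refine ⟨fun z hz => ?_, List.pairwise_cons.mpr hp⟩
        rcases List.mem_cons.mp hz with rfl | hz
        · exact hxy
        · exact PLE_trans hxy (hp.1 z hz)
      · rename_i hxy
        rw [List.pairwise_cons]
        refine ⟨fun z hz => ?_, ih hp.2⟩
        rcases List.mem_cons.mp ((hpush_perm x ys).mem_iff.mp hz) with rfl | hz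
        · exact PLE_total (fun hc => hxy hc)
        · exact hp.1 z hz

theorem pickMin_mem (b : Int × Int) (rs : List (Int × Int)) : pickMin b rs ∈ b :: rs := by
  induction rs generalizing b with
  | nil => simp [pickMin]
  | cons y ys ih =>
      simp only [pickMin, List.foldl_cons] at *
      rcases List.mem_cons.mp (ih (if y.2 < b.2 ∨ (y.2 = b.2 ∧ y.1 < b.1) then y else b)) with
        h | h
      · rw [h]; split <;> simp
      · simp [h]

-- pickMin really picks the (duration, start)-minimum: its swap is PLE-below every member's swap
theorem pickMin_min (rs : List (Int × Int)) (b : Int × Int) :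
    ∀ y ∈ b :: rs, PLE (pickMin b rs).swap y.swap := by
  induction rs generalizing b with
  | nil =>
      intro y hy
      rcases List.mem_cons.mp hy with rfl | hy
      · exact PLE_refl _
      · cases hy
  | cons z zs ih =>
      intro y hy
      have hstep : pickMin b (z :: zs)
          = pickMin (if z.2 < b.2 ∨ (z.2 = b.2 ∧ z.1 < b.1) then z else b) zs := rfl
      rw [hstep]
      have hcb : PLE (if z.2 < b.2 ∨ (z.2 = b.2 ∧ z.1 < b.1) then z else b).swap b.swap := by
        split <;> rename_i hc
        · simp only [PLE, pleB_iff, Prod.swap]; omega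
        · exact PLE_refl _
      have hcz : PLE (if z.2 < b.2 ∨ (z.2 = b.2 ∧ z.1 < b.1) then z else b).swap z.swap := by
        split <;> rename_i hc
        · exact PLE_refl _
        · simp only [PLE, pleB_iff, Prod.swap]; omega
      have hpick := ih (if z.2 < b.2 ∨ (z.2 = b.2 ∧ z.1 < b.1) then z else b)
      have hpc := hpick _ (List.mem_cons_self)
      rcases List.mem_cons.mp hy with rfl | hy
      · exact PLE_trans hpc hcb
      · rcases List.mem_cons.mp hy with rfl | hy
        · exact PLE_trans hpc hcz
        · exact hpick y (List.mem_cons_of_mem _ hy)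

-- one pop step: the head of A's sorted pool is exactly the swap of B's picked minimum,
-- and after removal the pools still correspond
theorem pop_corr {m : Int × Int} {rest ready : List (Int × Int)} (m0 : Int × Int)
    (rs : List (Int × Int))
    (hp : (m :: rest).Pairwise PLE) (hq : (m :: rest).Perm (ready.map Prod.swap))
    (hr : ready = m0 :: rs) :
    pickMin m0 rs = m.swap ∧
      rest.Perm ((ready.erase (pickMin m0 rs)).map Prod.swap) ∧ rest.Pairwise PLE := by
  subst hr
  have hmem : pickMin m0 rs ∈ m0 :: rs := pickMin_mem m0 rs
  have hswapmem : (pickMin m0 rs).swap ∈ m :: rest :=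
    hq.symm.mem_iff.mp (List.mem_map_of_mem hmem)
  have hhead : ∀ y ∈ m :: rest, PLE m y := by
    intro y hy
    rcases List.mem_cons.mp hy with rfl | hy
    · exact PLE_refl _
    · exact (List.pairwise_cons.mp hp).1 y hy
  have h1 : PLE m (pickMin m0 rs).swap := hhead _ hswapmem
  have h2 : PLE (pickMin m0 rs).swap m := by
    have : m ∈ (m0 :: rs).map Prod.swap := hq.mem_iff.mp List.mem_cons_self
    obtain ⟨y, hy, hym⟩ := List.mem_map.mp this
    have := pickMin_min rs m0 y hy
    rwa [hym] at this
  have heq : (pickMin m0 rs).swap = m := PLE_antisymm h2 h1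
  have hpick : pickMin m0 rs = m.swap := by rw [← heq, Prod.swap_swap]
  refine ⟨hpick, ?_, (List.pairwise_cons.mp hp).2⟩
  have hperm : (m0 :: rs).Perm (pickMin m0 rs :: (m0 :: rs).erase (pickMin m0 rs)) :=
    List.perm_cons_erase hmem
  have hperm2 : ((m0 :: rs).map Prod.swap).Perm
      (m :: ((m0 :: rs).erase (pickMin m0 rs)).map Prod.swap) := by
    have h' := hperm.map Prod.swap
    simp only [List.map_cons] at h' ⊢
    rw [heq] at h'
    exact h'
  exact (hq.trans hperm2).cons_inv

-- the inner release loops of the two ports advance in lockstep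
theorem drain_corr (js : List (Int × Int)) (t : Int) :
    ∀ (gas i : Nat) (heap ready : List (Int × Int)), gas = js.length - i →
      heap.Perm (ready.map Prod.swap) → heap.Pairwise PLE →
      (release (js.drop i) ready t).1 = js.drop (drain js js.length gas i heap t).1 ∧
      (drain js js.length gas i heap t).2.Perm
        ((release (js.drop i) ready t).2.map Prod.swap) ∧
      (drain js js.length gas i heap t).2.Pairwise PLE := by
  intro gas
  induction gas with
  | zero =>
      intro i heap ready hgas hq hp
      have hdrop : js.drop i = [] := List.drop_eq_nil_of_le (by omega)
      simp only [hdrop, release, drain]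
      exact ⟨trivial, hq, hp⟩
  | succ gas ih =>
      intro i heap ready hgas hq hp
      simp only [drain]
      by_cases hc : i < js.length ∧ (js.getD i (0, 0)).1 ≤ t
      · rw [if_pos hc]
        have hgd : js.getD i (0, 0) = js[i] := List.getD_eq_getElem js (0, 0) hc.1
        have hdrop : js.drop i = js[i] :: js.drop (i + 1) := List.drop_eq_getElem_cons hc.1
        have hrel : release (js.drop i) ready t
            = release (js.drop (i + 1)) (ready ++ [js[i]]) t := by
          rw [hdrop]
          simp only [release]
          rw [if_pos (by rw [hgd] at hc; exact hc.2)]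
        rw [hrel]
        refine ih (i + 1) _ (ready ++ [js[i]]) (by omega) ?_ (hpush_sorted _ hp)
        have h1 : (hpush ((js.getD i (0, 0)).2, (js.getD i (0, 0)).1) heap).Perm
            (((js.getD i (0, 0)).2, (js.getD i (0, 0)).1) :: heap) := hpush_perm _ _
        refine h1.trans ?_
        have h2 : ((ready ++ [js[i]]).map Prod.swap)
            = ready.map Prod.swap ++ [(js[i].2, js[i].1)] := by simp [Prod.swap]
        rw [h2, hgd]
        exact ((hq.cons _).trans (List.perm_append_singleton _ _).symm)
      · rw [if_neg hc]
        by_cases hi : i < js.length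
        · have hgd : js.getD i (0, 0) = js[i] := List.getD_eq_getElem js (0, 0) hi
          have hdrop : js.drop i = js[i] :: js.drop (i + 1) := List.drop_eq_getElem_cons hi
          have hnle : ¬ js[i].1 ≤ t := by
            rw [hgd] at hc
            intro h
            exact hc ⟨hi, h⟩
          rw [hdrop]
          simp only [release]
          rw [if_neg hnle]
          exact ⟨by rw [← hdrop], hq, hp⟩
        · have hdrop : js.drop i = [] := List.drop_eq_nil_of_le (by omega)
          simp only [hdrop, release]
          exact ⟨trivial, hq, hp⟩

-- the two outer loops agree whenever A's pool is a sorted arrangement of B's swapped pool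
theorem loop_eq (js : List (Int × Int)) :
    ∀ (fuel : Nat) (i : Nat) (heap ready : List (Int × Int)) (t tsum : Int),
      heap.Pairwise PLE → heap.Perm (ready.map Prod.swap) →
      loopA js js.length fuel i heap t tsum = loopB fuel (js.drop i) ready t tsum := by
  intro fuel
  induction fuel with
  | zero => intro i heap ready t tsum _ _; rfl
  | succ fuel ih =>
      intro i heap ready t tsum hp hq
      obtain ⟨c1, c2, c3⟩ := drain_corr js t (js.length - i) i heap ready rfl hq hp
      simp only [loopA, loopB]
      rcases hd : (drain js js.length (js.length - i) i heap t) with ⟨i', heap'⟩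
      rw [hd] at c1 c2 c3
      simp only at c1 c2 c3
      rcases heap' with _ | ⟨m, rest⟩
      · -- A's pool is empty: B's ready pool is empty too
        have hr : (release (js.drop i) ready t).2 = [] := by
          rcases hrel : (release (js.drop i) ready t).2 with _ | ⟨m0, rs⟩
          · rfl
          · rw [hrel] at c2; have := c2.length_eq; simp at this
        by_cases hi : i' < js.length
        · have hgd : js.getD i' (0, 0) = js[i'] := List.getD_eq_getElem js (0, 0) hi
          have hdrop : js.drop i' = js[i'] :: js.drop (i' + 1) :=
            List.drop_eq_getElem_cons hi
          have hrel2 : release (js.drop i) ready t = (js[i'] :: js.drop (i' + 1), []) :=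
            Prod.ext (by rw [c1, hdrop]) hr
          rw [hrel2]
          dsimp only
          rw [if_pos hi, hgd]
          have hih := ih i' [] [] js[i'].1 tsum List.Pairwise.nil (by simp)
          rw [hdrop] at hih
          exact hih
        · have hdrop : js.drop i' = [] := List.drop_eq_nil_of_le (by omega)
          have hrel2 : release (js.drop i) ready t = ([], []) :=
            Prod.ext (by rw [c1, hdrop]) hr
          rw [hrel2]
          dsimp only
          rw [if_neg hi]
      · -- A pops the head of its sorted pool; B picks and removes the minimum
        obtain ⟨m0, rs, hr⟩ : ∃ m0 rs, (release (js.drop i) ready t).2 = m0 :: rs := by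
          rcases hrel : (release (js.drop i) ready t).2 with _ | ⟨m0, rs⟩
          · rw [hrel] at c2; have := c2.length_eq; simp at this
          · exact ⟨m0, rs, rfl⟩
        obtain ⟨hpick, hperm, hsorted⟩ := pop_corr m0 rs c3 c2 hr
        rw [hr, hpick] at hperm
        have hrel2 : release (js.drop i) ready t = (js.drop i', m0 :: rs) :=
          Prod.ext c1 hr
        rw [hrel2]
        dsimp only
        rw [hpick]
        exact ih i' rest _ (t + m.1) (tsum + (t + m.1 - m.2)) hsorted hperm

-- ===== VERDICT (by name: the statement is the Claim_ definition above) =====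
theorem solution_spec : Claim_equal_solution := by
  intro jobs _ _
  unfold Spec_solution solution solution_alt jobPair
  have h := loop_eq (PySem.List.sorted2 (jobs.map (fun j => (j.getD 0 0, j.getD 1 0)))
      (fun p => p.1) (fun p => p.2)) (2 * (PySem.List.sorted2
      (jobs.map (fun j => (j.getD 0 0, j.getD 1 0))) (fun p => p.1) (fun p => p.2)).length + 2)
      0 [] [] 0 0 List.Pairwise.nil (by simp)
  rw [List.drop_zero] at h
  dsimp only
  rw [h]
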